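-- pv_equiv track=rewrite | github.com/jkjan/PS | Programmers/대회/1.py | solution
-- ===== SOURCE A (Python) =====
-- def solution(numbers):
--     answer = []
--     for n in numbers:
--         i = 0
--         original = n
--         while n % 2 != 0:
--             i += 1
--             n //= 2
--         answer.append(original + pow(2, i-1 if i != 0 else 0))
--     return answer
-- ===== SOURCE B (Python) =====
-- def solution(numbers):
--     # closed form: the trailing one-bits of n are the trailing zero-bits of n+1,
--     # so (n+1) & -(n+1) = 2^i where i is the trailing-ones count; offset = 2^i // 2, or 1 when i = 0
--     return [n + (((n + 1) & -(n + 1)) // 2 or 1) for n in numbers]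
-- ===== Notes on version B (the rewrite author's own statement) =====
-- stated objective: simpler
-- what changed: Replaces A's inner divide-while-odd loop (counting trailing one-bits of n, then pow(2,i-1 or 0)) by a per-element closed-form bit trick: (n+1)&-(n+1) is 2^(trailing ones of n), so the offset is that value floor-halved, or 1 when n is even; the whole function becomes one list comprehension with no inner loop.
-- outside the precondition, e.g. on solution([-1]): A does not finish within the time limit, B returns [0]
import Mathlib
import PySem

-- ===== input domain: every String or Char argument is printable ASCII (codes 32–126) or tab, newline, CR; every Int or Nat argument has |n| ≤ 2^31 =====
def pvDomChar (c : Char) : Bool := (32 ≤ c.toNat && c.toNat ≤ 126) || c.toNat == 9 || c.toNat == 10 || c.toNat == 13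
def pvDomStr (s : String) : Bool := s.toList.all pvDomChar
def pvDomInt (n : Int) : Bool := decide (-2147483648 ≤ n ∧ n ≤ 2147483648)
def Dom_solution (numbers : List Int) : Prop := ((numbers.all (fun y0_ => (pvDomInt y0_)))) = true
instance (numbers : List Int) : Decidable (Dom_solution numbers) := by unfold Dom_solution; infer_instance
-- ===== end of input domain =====

-- B replaces A's inner divide-while-odd loop by the closed-form lowest-set-bit trick on n+1 (simpler: one comprehension, no inner loop).

-- ===== PORT A =====
-- A's while loop: `while n % 2 != 0: i += 1; n //= 2`, carried state (i, n).
-- Fuel n.natAbs + 1 strictly bounds the number of iterations for every n ≠ -1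
-- (on n = -1 the Python loop never terminates; Pre_solution excludes such inputs).
def solLoop : Nat → Int → Int → Int × Int
  | 0, i, n => (i, n)
  | fuel + 1, i, n =>
    if PySem.Int.mod n 2 ≠ 0 then solLoop fuel (i + 1) (PySem.Int.floordiv n 2)
    else (i, n)

def solution (numbers : List Int) : List Int :=
  numbers.foldl (fun answer n =>
    let p := solLoop (n.natAbs + 1) 0 n
    -- pow(2, i-1 if i != 0 else 0): i is a counter starting at 0, so the exponent is ≥ 0 and toNat is exact
    answer ++ [n + 2 ^ ((if p.1 ≠ 0 then p.1 - 1 else 0).toNat)]) []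

-- ===== PORT B =====
def solution_alt (numbers : List Int) : List Int :=
  numbers.map (fun n =>
    let o := PySem.Int.floordiv (Int.land (n + 1) (-(n + 1))) 2
    -- Python `o or 1`: o here is 0 or a positive power of two, so truthiness is `o ≠ 0`
    n + (if o = 0 then 1 else o))

-- ===== PRECONDITION & SPEC =====
-- Pre_ excludes lists containing -1: there A's while loop never terminates (Python diverges, returns nothing).
def Pre_solution (numbers : List Int) : Prop := (-1 : Int) ∉ numbers
instance (numbers : List Int) : Decidable (Pre_solution numbers) := by unfold Pre_solution; infer_instance
def pvWitness_solution : List Int := [0, 3, -6, 7, 2147483647]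

def Spec_solution (numbers : List Int) (out : List Int) : Prop := out = solution_alt numbers
instance (numbers : List Int) (out : List Int) : Decidable (Spec_solution numbers out) := by unfold Spec_solution; infer_instance

-- ===== CLAIM (what is proved, stated in full; the proofs are below) =====
def Claim_equal_solution : Prop := ∀ (numbers : List Int), Dom_solution numbers → Pre_solution numbers → Spec_solution numbers (solution numbers)

-- ===== LEMMAS AND PROOFS =====

-- lowest set bit of m, in Nat form: land m (-m) = ldiff |m| (|m|-1) for m ≠ 0
lemma land_neg_self_eq_ldiff (m : Int) (hm : m ≠ 0) :
    Int.land m (-m) = ((Nat.ldiff m.natAbs (m.natAbs - 1) : Nat) : Int) := by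
  match m with
  | Int.ofNat k =>
    match k with
    | 0 => exact absurd rfl hm
    | j + 1 =>
      have h : -(Int.ofNat (j + 1)) = Int.negSucc j := rfl
      rw [h]
      have h2 : ((Int.ofNat (j + 1))).natAbs = j + 1 := rfl
      rw [h2]
      simp [Int.land]
  | Int.negSucc j =>
    have h : -(Int.negSucc j) = Int.ofNat (j + 1) := rfl
    rw [h]
    simp [Int.land]

lemma ldiff_odd (b : Nat) : Nat.ldiff (2 * b + 1) (2 * b) = 1 := by
  apply Nat.eq_of_testBit_eq
  intro i
  cases i with
  | zero =>
    rw [Nat.testBit_ldiff]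
    simp only [Nat.testBit_zero]
    have h1 : (2 * b + 1) % 2 = 1 := by omega
    have h2 : (2 * b) % 2 = 0 := by omega
    simp [h1, h2]
  | succ i =>
    rw [Nat.testBit_ldiff, Nat.testBit_add_one, Nat.testBit_add_one, Nat.testBit_add_one]
    have h1 : (2 * b + 1) / 2 = b := by omega
    have h2 : 2 * b / 2 = b := by omega
    have h3 : (1 : Nat) / 2 = 0 := by omega
    rw [h1, h2, h3]
    simp [Nat.zero_testBit]

lemma ldiff_even (c : Nat) (_hc : c ≠ 0) :
    Nat.ldiff (2 * c) (2 * c - 1) = 2 * Nat.ldiff c (c - 1) := by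
  apply Nat.eq_of_testBit_eq
  intro i
  cases i with
  | zero =>
    rw [Nat.testBit_ldiff]
    simp only [Nat.testBit_zero]
    have h1 : (2 * c) % 2 = 0 := by omega
    have h2 : (2 * Nat.ldiff c (c - 1)) % 2 = 0 := by omega
    simp [h1, h2]
  | succ i =>
    rw [Nat.testBit_ldiff, Nat.testBit_add_one, Nat.testBit_add_one, Nat.testBit_add_one]
    have h1 : 2 * c / 2 = c := by omega
    have h2 : (2 * c - 1) / 2 = c - 1 := by omega
    have h3 : 2 * Nat.ldiff c (c - 1) / 2 = Nat.ldiff c (c - 1) := by omega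
    rw [h1, h2, h3, Nat.testBit_ldiff]

lemma land_odd (m : Int) (ho : m % 2 ≠ 0) : Int.land m (-m) = 1 := by
  have hm : m ≠ 0 := by omega
  rw [land_neg_self_eq_ldiff m hm]
  obtain ⟨b, hb⟩ : ∃ b, m.natAbs = 2 * b + 1 := ⟨m.natAbs / 2, by omega⟩
  rw [hb]
  have : 2 * b + 1 - 1 = 2 * b := by omega
  rw [this, ldiff_odd]
  rfl

lemma land_even (m : Int) (hm : m ≠ 0) (he : m % 2 = 0) :
    Int.land m (-m) = 2 * Int.land (m / 2) (-(m / 2)) := by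
  obtain ⟨k, hk⟩ : ∃ k, m = 2 * k := ⟨m / 2, by omega⟩
  subst hk
  have hk2 : (2 * k) / 2 = k := by omega
  rw [hk2]
  have hk0 : k ≠ 0 := by omega
  rw [land_neg_self_eq_ldiff _ hm, land_neg_self_eq_ldiff k hk0]
  have hc : (2 * k).natAbs = 2 * k.natAbs := by omega
  have hc0 : k.natAbs ≠ 0 := by omega
  rw [hc, ldiff_even _ hc0]
  push_cast
  ring

-- the loop returns i + t where t is the trailing-ones count of n, and land (n+1) (-(n+1)) = 2^t
lemma loop_key : ∀ (fuel : Nat) (n : Int), n.natAbs < fuel → n ≠ -1 → ∀ i : Int,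
    ∃ t : Nat, (solLoop fuel i n).1 = i + t ∧ Int.land (n + 1) (-(n + 1)) = 2 ^ t := by
  intro fuel
  induction fuel with
  | zero => intro n h; omega
  | succ fuel ih =>
    intro n hlt hn i
    rw [solLoop]
    have hmod : PySem.Int.mod n 2 = n % 2 := PySem.Int.mod_eq_emod_of_pos (by omega)
    by_cases hpar : n % 2 = 0
    · -- even: loop stops, t = 0, n+1 odd
      rw [hmod, if_neg (by simpa using hpar)]
      refine ⟨0, by simp, ?_⟩
      rw [land_odd (n + 1) (by omega)]
      norm_num
    · -- odd (and n ≠ -1): one step, recurse on n // 2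
      rw [hmod, if_pos (by simpa using hpar)]
      have hdiv : PySem.Int.floordiv n 2 = n / 2 := PySem.Int.floordiv_eq_ediv_of_pos (by omega)
      rw [hdiv]
      have hlt' : (n / 2).natAbs < fuel := by omega
      have hn' : n / 2 ≠ -1 := by omega
      obtain ⟨t, ht1, ht2⟩ := ih (n / 2) hlt' hn' (i + 1)
      refine ⟨t + 1, by rw [ht1]; push_cast; ring, ?_⟩
      have h1 : (n + 1) % 2 = 0 := by omega
      have h2 : n + 1 ≠ 0 := by omega
      rw [land_even (n + 1) h2 h1]
      have h3 : (n + 1) / 2 = n / 2 + 1 := by omega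
      rw [h3, ht2]
      ring

-- per-element agreement for n ≠ -1
lemma elem_eq (n : Int) (hn : n ≠ -1) :
    n + 2 ^ ((if (solLoop (n.natAbs + 1) 0 n).1 ≠ 0 then (solLoop (n.natAbs + 1) 0 n).1 - 1 else 0).toNat)
      = n + (if PySem.Int.floordiv (Int.land (n + 1) (-(n + 1))) 2 = 0 then 1
             else PySem.Int.floordiv (Int.land (n + 1) (-(n + 1))) 2) := by
  obtain ⟨t, ht1, ht2⟩ := loop_key (n.natAbs + 1) n (by omega) hn 0
  rw [ht1, ht2, zero_add]
  rw [PySem.Int.floordiv_eq_ediv_of_pos (show (0:Int) < 2 by omega)]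
  cases t with
  | zero => norm_num
  | succ t =>
    have hpow : ((2 : Int) ^ (t + 1)) / 2 = 2 ^ t := by
      rw [pow_succ, Int.mul_ediv_cancel _ (by omega)]
    rw [hpow, if_pos (show ((t + 1 : Nat) : Int) ≠ 0 by push_cast; omega),
      if_neg (show ¬((2 : Int) ^ t = 0) from pow_ne_zero t (by norm_num))]
    congr 1
    congr 1
    omega

-- fold-with-append vs map, elementwise equal on members
lemma fold_eq_map : ∀ (l : List Int) (acc : List Int), ((-1 : Int) ∉ l) →
    l.foldl (fun answer n =>
      let p := solLoop (n.natAbs + 1) 0 n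
      answer ++ [n + 2 ^ ((if p.1 ≠ 0 then p.1 - 1 else 0).toNat)]) acc
    = acc ++ l.map (fun n =>
        let o := PySem.Int.floordiv (Int.land (n + 1) (-(n + 1))) 2
        n + (if o = 0 then 1 else o)) := by
  intro l
  induction l with
  | nil => intro acc _; simp
  | cons n l ih =>
    intro acc hpre
    have hn : n ≠ -1 := fun h => hpre (h ▸ List.mem_cons_self ..)
    have hl : (-1 : Int) ∉ l := fun h => hpre (List.mem_cons_of_mem _ h)
    simp only [List.foldl_cons, List.map_cons]
    rw [ih _ hl]
    simp only [List.append_assoc, List.singleton_append]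
    congr 2
    exact elem_eq n hn

-- ===== VERDICT (by name: the statement is the Claim_ definition above) =====
theorem solution_spec : Claim_equal_solution := by
  intro numbers _ hpre
  unfold Spec_solution solution solution_alt
  simpa using fold_eq_map numbers [] hpre
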